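-- pv_equiv track=rewrite | github.com/fullstorydev/pathing-utils | pathutils/analyze_traffic.py | get_sublist_indices
-- ===== SOURCE A (Python) =====
-- def get_sublist_indices(funnel: list, column: list, strict: bool) -> list:
--     """
--     get_sublist_indices returns a list of indices of the column list at which the funnel starts. The 'strict' argument means that
--     funnel needs to match the sublist (or sublists) of column exactly. (Alternative is not currently implemented)
--
--     :param funnel: funnel list
--     :param column: column list
--     :param strict: if True, enforce the funnel order strictly
--     :return: list of starting indices for funnel sublist
--     """
--     funnelStartIndices = []
--     if strict:
--         funnelLen = len(funnel)
--         starts = [i for i, x in enumerate(column) if x == funnel[0]]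
--         for start in starts:
--             if funnel == column[start : start + funnelLen]:
--                 funnelStartIndices.append(start)
--     return funnelStartIndices
-- ===== SOURCE B (Python) =====
-- def get_sublist_indices(funnel: list, column: list, strict: bool) -> list:
--     """Rabin-Karp: rolling-hash candidate filter with exact verification."""
--     if not strict:
--         return []
--     m, n = len(funnel), len(column)
--     if m == 0:
--         # empty funnel matches at every position
--         return list(range(n + 1))
--     if m > n:
--         return []
--     MOD = 2147483647
--     BASE = 1024
--     phash = 0
--     for x in funnel:
--         phash = (phash * BASE + x) % MOD
--     h = 0
--     for x in column[:m]:
--         h = (h * BASE + x) % MOD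
--     pw = pow(BASE, m - 1, MOD)
--     res = []
--     for i in range(n - m + 1):
--         if h == phash and column[i:i + m] == funnel:
--             res.append(i)
--         if i + m < n:
--             h = ((h - column[i] * pw) * BASE + column[i + m]) % MOD
--     return res
-- ===== Notes on version B (the rewrite author's own statement) =====
-- stated objective: alternative
-- what changed: Replaces A's first-element prefilter plus per-candidate slice comparison with a Rabin-Karp rolling-hash scan whose hash hits are verified exactly.
-- outside the precondition, e.g. on get_sublist_indices([], [], True): A returns [], B returns [0]
import Mathlib
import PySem

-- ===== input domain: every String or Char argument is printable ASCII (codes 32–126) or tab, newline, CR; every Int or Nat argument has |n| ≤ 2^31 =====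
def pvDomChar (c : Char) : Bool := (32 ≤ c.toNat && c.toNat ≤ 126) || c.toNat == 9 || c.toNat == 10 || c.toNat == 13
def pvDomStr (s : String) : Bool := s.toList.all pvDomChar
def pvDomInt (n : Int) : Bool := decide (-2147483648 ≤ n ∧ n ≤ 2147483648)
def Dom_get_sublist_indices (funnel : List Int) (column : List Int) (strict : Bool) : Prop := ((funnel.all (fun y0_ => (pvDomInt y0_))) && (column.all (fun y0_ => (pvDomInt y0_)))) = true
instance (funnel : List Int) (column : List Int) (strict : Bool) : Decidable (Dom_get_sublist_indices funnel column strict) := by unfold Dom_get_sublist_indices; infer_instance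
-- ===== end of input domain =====

-- B replaces A's first-element prefilter + slice comparison at every candidate with a
-- Rabin–Karp rolling hash (candidates verified exactly); same results, different algorithm.

-- ===== PORT A =====
def get_sublist_indices (funnel : List Int) (column : List Int) (strict : Bool) : List Int :=
  if strict then
    -- funnel[0]: IndexError on empty funnel (excluded by Pre_)
    match PySem.List.pyGet? funnel 0 with
    | none => []
    | some f0 =>
      let funnelLen : Int := funnel.length
      let starts := ((PySem.List.enumerate column 0).filter (fun p => p.2 == f0)).map (fun p => p.1)
      starts.foldl (fun acc start =>
        if funnel = PySem.List.slice column (some start) (some (start + funnelLen)) then acc ++ [start]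
        else acc) []
  else []

-- ===== PORT B =====
-- helper: one Rabin–Karp hash step, (a * BASE + x) % MOD
def hstep (a x : Int) : Int := PySem.Int.mod (a * 1024 + x) 2147483647

-- helper: body of B's main loop — emit on verified hash hit, then roll the window hash
def rkStep (funnel column : List Int) (phash pw m n : Int) (st : Int × List Int) (i : Int) :
    Int × List Int :=
  let res := if st.1 = phash ∧ PySem.List.slice column (some i) (some (i + m)) = funnel
             then st.2 ++ [i] else st.2
  let h := if i + m < n
           then PySem.Int.mod ((st.1 - (PySem.List.pyGet? column i).getD 0 * pw) * 1024
                  + (PySem.List.pyGet? column (i + m)).getD 0) 2147483647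
           else st.1
  (h, res)

def get_sublist_indices_alt (funnel : List Int) (column : List Int) (strict : Bool) : List Int :=
  if !strict then []
  else
    let m : Int := funnel.length
    let n : Int := column.length
    if m = 0 then PySem.List.pyRange 0 (n + 1) 1
    else if m > n then []
    else
      let phash := funnel.foldl hstep 0
      let h := (PySem.List.slice column none (some m)).foldl hstep 0
      let pw := PySem.Int.mod ((1024 : Int) ^ (m - 1).toNat) 2147483647  -- pow(BASE, m-1, MOD)
      ((PySem.List.pyRange 0 (n - m + 1) 1).foldl (rkStep funnel column phash pw m n) (h, [])).2

-- ===== PRECONDITION & SPEC =====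
-- Pre_ excludes strict=True with an empty funnel: there A raises IndexError (funnel[0]) whenever
-- column is nonempty, and on an empty column returns [] only because its candidate list is empty,
-- while B naturally reports the empty pattern's match at index 0 — an unspecifiable corner.
def Pre_get_sublist_indices (funnel : List Int) (column : List Int) (strict : Bool) : Prop :=
  strict = true → funnel ≠ []

instance (funnel : List Int) (column : List Int) (strict : Bool) :
    Decidable (Pre_get_sublist_indices funnel column strict) := by
  unfold Pre_get_sublist_indices; infer_instance

def pvWitness_get_sublist_indices : List Int × List Int × Bool := ([1], [1, 2, 1], true)

def Spec_get_sublist_indices (funnel : List Int) (column : List Int) (strict : Bool) (out : List Int) : Prop := out = get_sublist_indices_alt funnel column strict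
instance (funnel : List Int) (column : List Int) (strict : Bool) (out : List Int) : Decidable (Spec_get_sublist_indices funnel column strict out) := by unfold Spec_get_sublist_indices; infer_instance

-- ===== CLAIM (what is proved, stated in full; the proofs are below) =====
def Claim_equal_get_sublist_indices : Prop := ∀ (funnel : List Int) (column : List Int) (strict : Bool), Dom_get_sublist_indices funnel column strict → Pre_get_sublist_indices funnel column strict → Spec_get_sublist_indices funnel column strict (get_sublist_indices funnel column strict)


-- ===== LEMMAS AND PROOFS =====

-- the window of length m starting at j
def win (c : List Int) (m j : Nat) : List Int := (c.drop j).take m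

-- integer Rabin-Karp hash of a list
def intHash (xs : List Int) : Int := xs.foldl hstep 0

-- the same hash computed in ZMod (no mod steps needed)
def zstep (b : ZMod 2147483647) (x : Int) : ZMod 2147483647 := b * 1024 + (x : ZMod 2147483647)

def zHash (xs : List Int) : ZMod 2147483647 := xs.foldl zstep 0

lemma cast_pymod (a : Int) :
    ((PySem.Int.mod a 2147483647 : Int) : ZMod 2147483647) = (a : ZMod 2147483647) := by
  rw [PySem.Int.mod_eq_emod_of_pos (by norm_num)]
  have := ZMod.intCast_mod a 2147483647
  norm_num at this ⊢
  exact this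

lemma pymod_bounds (a : Int) :
    0 ≤ PySem.Int.mod a 2147483647 ∧ PySem.Int.mod a 2147483647 < 2147483647 := by
  rw [PySem.Int.mod_eq_emod_of_pos (by norm_num)]
  exact ⟨Int.emod_nonneg a (by norm_num), Int.emod_lt_of_pos a (by norm_num)⟩

lemma int_eq_of_zmod_eq {a b : Int} (ha : 0 ≤ a ∧ a < 2147483647) (hb : 0 ≤ b ∧ b < 2147483647)
    (h : (a : ZMod 2147483647) = (b : ZMod 2147483647)) : a = b := by
  have hm := (ZMod.intCast_eq_intCast_iff a b 2147483647).mp h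
  have : a % (2147483647 : Int) = b % (2147483647 : Int) := by
    have h2 := hm
    norm_num [Int.ModEq] at h2
    exact h2
  rwa [Int.emod_eq_of_lt ha.1 (by exact_mod_cast ha.2),
       Int.emod_eq_of_lt hb.1 (by exact_mod_cast hb.2)] at this

lemma cast_foldl_hstep (xs : List Int) (a : Int) :
    ((xs.foldl hstep a : Int) : ZMod 2147483647) = xs.foldl zstep ((a : Int) : ZMod 2147483647) := by
  induction xs generalizing a with
  | nil => rfl
  | cons x xs ih =>
    simp only [List.foldl_cons]
    rw [ih]
    congr 1
    rw [hstep, cast_pymod]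
    push_cast
    rw [zstep]

lemma zfold_shift (xs : List Int) (a : ZMod 2147483647) :
    xs.foldl zstep a = a * 1024 ^ xs.length + zHash xs := by
  induction xs generalizing a with
  | nil => simp [zHash]
  | cons x xs ih =>
    simp only [List.foldl_cons, zHash] at *
    rw [ih, ih (zstep 0 x)]
    simp only [zstep, List.length_cons]
    ring

lemma intHash_bounds (xs : List Int) (h : xs ≠ []) :
    0 ≤ intHash xs ∧ intHash xs < 2147483647 := by
  rcases List.eq_nil_or_concat xs with rfl | ⟨ys, y, rfl⟩
  · exact absurd rfl h
  · rw [intHash, List.concat_eq_append, List.foldl_append, List.foldl_cons, List.foldl_nil]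
    exact pymod_bounds _

lemma win_succ (c : List Int) (m j : Nat) (hm : 1 ≤ m) (hj : j + m < c.length) :
    win c m j = c.getD j 0 :: (c.drop (j + 1)).take (m - 1)
      ∧ win c m (j + 1) = (c.drop (j + 1)).take (m - 1) ++ [c.getD (j + m) 0] := by
  have hjn : j < c.length := by omega
  have hjm : j + m < c.length := hj
  obtain ⟨k, rfl⟩ : ∃ k, m = k + 1 := ⟨m - 1, by omega⟩
  simp only [Nat.add_sub_cancel]
  constructor
  · rw [win, List.drop_eq_getElem_cons hjn, List.take_succ_cons,
      List.getD_eq_getElem c 0 hjn]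
  · rw [win, List.take_add_one]
    congr 1
    rw [List.getElem?_drop]
    have he : j + 1 + k = j + (k + 1) := by omega
    rw [he, List.getElem?_eq_getElem hjm]
    simp [List.getD, List.getElem?_eq_getElem hjm]

lemma zHash_cons (x : Int) (xs : List Int) :
    zHash (x :: xs) = (x : ZMod 2147483647) * 1024 ^ xs.length + zHash xs := by
  rw [zHash, List.foldl_cons, zfold_shift]
  simp [zstep]

lemma zHash_concat (xs : List Int) (y : Int) :
    zHash (xs ++ [y]) = zHash xs * 1024 + (y : ZMod 2147483647) := by
  rw [zHash, List.foldl_append, List.foldl_cons, List.foldl_nil]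
  rfl

lemma roll_correct (c : List Int) (m j : Nat) (hm : 1 ≤ m) (hj : j + m < c.length) :
    PySem.Int.mod ((intHash (win c m j)
        - c.getD j 0 * PySem.Int.mod ((1024 : Int) ^ (m - 1)) 2147483647) * 1024
        + c.getD (j + m) 0) 2147483647
      = intHash (win c m (j + 1)) := by
  have hmly : ((c.drop (j + 1)).take (m - 1)).length = m - 1 := by
    rw [List.length_take, List.length_drop]; omega
  obtain ⟨h1, h2⟩ := win_succ c m j hm hj
  have hw' : win c m (j + 1) ≠ [] := by rw [h2]; simp
  apply int_eq_of_zmod_eq (pymod_bounds _) (intHash_bounds _ hw')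
  have cA : ((intHash (win c m j) : Int) : ZMod 2147483647) = zHash (win c m j) := by
    rw [intHash, cast_foldl_hstep, Int.cast_zero]; rfl
  have cB : ((intHash (win c m (j + 1)) : Int) : ZMod 2147483647) = zHash (win c m (j + 1)) := by
    rw [intHash, cast_foldl_hstep, Int.cast_zero]; rfl
  rw [cast_pymod]
  push_cast
  rw [cast_pymod, cA, cB, h1, h2, zHash_cons, zHash_concat, hmly]
  push_cast
  ring

lemma win_length (c : List Int) (m j : Nat) : (win c m j).length = min m (c.length - j) := by
  simp [win]

lemma win_head (c : List Int) (m j : Nat) (f0 : Int) (tl : List Int)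
    (hw : win c m j = f0 :: tl) : c.getD j 0 = f0 := by
  have hsplit := List.take_append_drop m (c.drop j)
  rw [win] at hw
  rw [hw] at hsplit
  have h0 : (c.drop j)[0]? = some f0 := by rw [← hsplit]; rfl
  rw [List.getElem?_drop] at h0
  simp only [Nat.add_zero] at h0
  rw [List.getD_eq_getElem?_getD, h0]
  rfl

lemma rk_loop (p c : List Int) (hm : 1 ≤ p.length) (hmn : p.length ≤ c.length) :
    ∀ (k j : Nat) (acc : List Int) (h : Int),
      j + k = c.length - p.length + 1 →
      h = intHash (win c p.length j) →
      ((PySem.List.pyRange (j : Int) (((c.length - p.length + 1 : Nat) : Int)) 1).foldl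
          (rkStep p c (intHash p)
            (PySem.Int.mod ((1024 : Int) ^ (((p.length : Int)) - 1).toNat) 2147483647)
            (p.length : Int) (c.length : Int)) (h, acc)).2
        = acc ++ ((List.range' j k).filter (fun t => decide (win c p.length t = p))).map
            (fun (t : Nat) => (t : Int)) := by
  intro k
  induction k with
  | zero =>
    intro j acc h hjk _
    rw [PySem.List.pyRange_one_eq_nil (by exact_mod_cast (by omega : c.length - p.length + 1 ≤ j))]
    simp
  | succ k ih =>
    intro j acc h hjk hinv
    have hjlt : j < c.length - p.length + 1 := by omega
    rw [PySem.List.pyRange_one_cons (by exact_mod_cast hjlt), List.foldl_cons]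
    have hslice : PySem.List.slice c (some (j : Int)) (some ((j : Int) + (p.length : Int)))
        = win c p.length j := PySem.List.slice_natCast_add c j p.length
    have hcond : (h = intHash p ∧
        PySem.List.slice c (some (j : Int)) (some ((j : Int) + (p.length : Int))) = p)
        ↔ win c p.length j = p := by
      rw [hslice]
      exact ⟨fun hx => hx.2, fun hw => ⟨by rw [hinv, hw], hw⟩⟩
    simp only [rkStep]
    rw [if_congr hcond rfl rfl]
    rcases Nat.eq_zero_or_pos k with rfl | hk
    · have hnil : PySem.List.pyRange ((j : Int) + 1) (((c.length - p.length + 1 : Nat)) : Int) 1 = [] :=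
        PySem.List.pyRange_one_eq_nil (by push_cast; omega)
      rw [hnil, List.foldl_nil]
      by_cases hwp : win c p.length j = p <;> simp [hwp, List.range'_one]
    · have hjm : j + p.length < c.length := by omega
      have hif : ((j : Int) + (p.length : Int) < (c.length : Int)) := by exact_mod_cast hjm
      rw [if_pos hif]
      have hpw : (((p.length : Int)) - 1).toNat = p.length - 1 := by omega
      have hget1 : (PySem.List.pyGet? c (j : Int)).getD 0 = c.getD j 0 := by
        rw [PySem.List.pyGet?_natCast, List.getD_eq_getElem?_getD]
      have hget2 : (PySem.List.pyGet? c ((j : Int) + (p.length : Int))).getD 0 = c.getD (j + p.length) 0 := by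
        rw [← Nat.cast_add, PySem.List.pyGet?_natCast, List.getD_eq_getElem?_getD]
      have hroll : PySem.Int.mod ((h - (PySem.List.pyGet? c (j : Int)).getD 0 *
            PySem.Int.mod ((1024 : Int) ^ (((p.length : Int)) - 1).toNat) 2147483647) * 1024
            + (PySem.List.pyGet? c ((j : Int) + (p.length : Int))).getD 0) 2147483647
          = intHash (win c p.length (j + 1)) := by
        rw [hget1, hget2, hpw, hinv]
        exact roll_correct c p.length j hm hjm
      rw [hroll]
      have hcast : ((j : Int) + 1) = ((j + 1 : Nat) : Int) := by push_cast; ring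
      rw [hcast, ih (j + 1) _ _ (by omega) rfl, List.range'_succ]
      by_cases hwp : win c p.length j = p <;> simp [hwp]

lemma A_char (f0 : Int) (tl c : List Int) :
    get_sublist_indices (f0 :: tl) c true
      = ((List.range c.length).filter
          (fun j => (c.getD j 0 == f0) && decide ((f0 :: tl) = win c (f0 :: tl).length j))).map
          (fun (j : Nat) => (j : Int)) := by
  unfold get_sublist_indices
  rw [if_pos rfl, PySem.List.pyGet?_zero_cons]
  dsimp only
  rw [PySem.List.foldl_append_ite_eq_filter
    (fun start => (f0 :: tl) = PySem.List.slice c (some start)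
      (some (start + ((f0 :: tl).length : Int))))]
  rw [List.nil_append, PySem.List.enumerate_eq_map_pyRange c 0]
  have hlen : PySem.List.len c = ((c.length : Nat) : Int) := rfl
  rw [hlen, PySem.List.pyRange_zero_nat]
  simp only [List.filter_map, List.map_map, List.filter_filter]
  rw [List.filter_congr (q := fun j =>
      (c.getD j 0 == f0) && decide ((f0 :: tl) = win c (f0 :: tl).length j)) ?_]
  · apply List.map_congr_left
    intro j _
    rfl
  · intro j _
    simp only [Function.comp_apply, PySem.List.pyGetD_natCast,
      PySem.List.slice_natCast_add, win, Bool.and_comm]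
    rfl


lemma B_char (p c : List Int) (hp : p ≠ []) (hmn : p.length ≤ c.length) :
    get_sublist_indices_alt p c true
      = ((List.range (c.length - p.length + 1)).filter
          (fun j => decide (win c p.length j = p))).map (fun (j : Nat) => (j : Int)) := by
  have hm1 : 1 ≤ p.length := List.length_pos_iff.mpr hp
  unfold get_sublist_indices_alt
  dsimp only
  rw [Bool.not_true, if_neg (by simp), if_neg (by exact_mod_cast Nat.pos_iff_ne_zero.mp hm1),
    if_neg (by exact_mod_cast Nat.not_lt.mpr hmn)]
  have hcast : (c.length : Int) - (p.length : Int) + 1 = ((c.length - p.length + 1 : Nat) : Int) := by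
    omega
  have h0eq : (PySem.List.slice c none (some ((p.length : Nat) : Int))).foldl hstep 0
      = intHash (win c p.length 0) := by
    rw [PySem.List.slice_to_natCast, win, List.drop_zero]
    rfl
  rw [hcast]
  have hmain := rk_loop p c hm1 hmn (c.length - p.length + 1) 0 []
    ((PySem.List.slice c none (some ((p.length : Nat) : Int))).foldl hstep 0)
    (by omega) h0eq
  simpa [intHash, List.range_eq_range'] using hmain

lemma win_ne_of_short (f0 : Int) (tl c : List Int) (j : Nat)
    (hj : c.length < (f0 :: tl).length + j) : win c (f0 :: tl).length j ≠ f0 :: tl := by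
  intro hw
  have hl := win_length c (f0 :: tl).length j
  rw [hw] at hl
  have hle : (f0 :: tl).length ≤ c.length - j := hl ▸ min_le_right _ _
  have hm1 : 1 ≤ (f0 :: tl).length := by simp
  omega

lemma filters_eq (f0 : Int) (tl c : List Int) (hmn : (f0 :: tl).length ≤ c.length) :
    (List.range c.length).filter
        (fun j => (c.getD j 0 == f0) && decide ((f0 :: tl) = win c (f0 :: tl).length j))
      = (List.range (c.length - (f0 :: tl).length + 1)).filter
        (fun j => decide (win c (f0 :: tl).length j = (f0 :: tl))) := by
  have hm1 : 1 ≤ (f0 :: tl).length := by simp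
  have hsplit : c.length = (c.length - (f0 :: tl).length + 1) + ((f0 :: tl).length - 1) := by
    omega
  conv_lhs => rw [hsplit, List.range_add, List.filter_append]
  have h2 : ((List.range ((f0 :: tl).length - 1)).map
      (fun x => c.length - (f0 :: tl).length + 1 + x)).filter
        (fun j => (c.getD j 0 == f0) && decide ((f0 :: tl) = win c (f0 :: tl).length j)) = [] := by
    rw [List.filter_eq_nil_iff]
    intro a ha
    simp only [List.mem_map, List.mem_range] at ha
    obtain ⟨x, hx, rfl⟩ := ha
    have hne := win_ne_of_short f0 tl c (c.length - (f0 :: tl).length + 1 + x) (by omega)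
    simp only [Bool.and_eq_true, not_and, beq_iff_eq, decide_eq_true_eq]
    intro _ h
    exact hne h.symm
  rw [h2, List.append_nil]
  apply List.filter_congr
  intro j _
  by_cases hw : win c (f0 :: tl).length j = f0 :: tl
  · have hh := win_head c (f0 :: tl).length j f0 tl hw
    rw [List.getD_eq_getElem?_getD] at hh
    simp only [List.length_cons] at hw
    simp [hw, hh]
  · have hw' : ¬(f0 :: tl = win c (f0 :: tl).length j) := fun h => hw h.symm
    simp only [List.length_cons] at hw hw'
    simp [hw, hw']

-- ===== VERDICT (by name: the statement is the Claim_ definition above) =====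
theorem get_sublist_indices_spec : Claim_equal_get_sublist_indices := by
  intro funnel column strict _ hpre
  unfold Spec_get_sublist_indices
  cases strict with
  | false => simp [get_sublist_indices, get_sublist_indices_alt]
  | true =>
    obtain ⟨f0, tl, rfl⟩ := List.exists_cons_of_ne_nil (hpre rfl)
    by_cases hmn : (f0 :: tl).length ≤ column.length
    · rw [A_char, B_char _ _ (List.cons_ne_nil f0 tl) hmn, filters_eq f0 tl column hmn]
    · have hA : (List.range column.length).filter
          (fun j => (column.getD j 0 == f0)
            && decide ((f0 :: tl) = win column (f0 :: tl).length j)) = [] := by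
        rw [List.filter_eq_nil_iff]
        intro j hj
        simp only [List.mem_range] at hj
        have hne := win_ne_of_short f0 tl column j (by omega)
        simp only [Bool.and_eq_true, not_and, beq_iff_eq, decide_eq_true_eq]
        intro _ h
        exact hne h.symm
      have hB : get_sublist_indices_alt (f0 :: tl) column true = [] := by
        unfold get_sublist_indices_alt
        dsimp only
        rw [Bool.not_true, if_neg (by simp), if_neg (by omega),
          if_pos (by exact_mod_cast Nat.not_le.mp hmn)]
      rw [A_char, hA, List.map_nil, hB]
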